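-- pv_equiv track=rewrite | github.com/facebook/redex | test/bisect-passes.py | slice_passes
-- ===== SOURCE A (Python) =====
-- SPECIAL_PASSES = [
--     'ReBindRefsPass',
--     'InterDexPass',
-- ]
--
-- def slice_passes(passes, low, high):
--     newpasses = []
--     newidx = 0
--     for oldidx in range(0, len(passes)):
--         p = passes[oldidx]
--         if p in SPECIAL_PASSES:
--             newpasses.append(p)
--             continue
--         if newidx >= low and newidx < high:
--             newpasses.append(p)
--         newidx += 1
--     return newpasses
-- ===== SOURCE B (Python) =====
-- SPECIAL_PASSES = [
--     'ReBindRefsPass',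
--     'InterDexPass',
-- ]
--
-- def slice_passes(passes, low, high):
--     # Index-set reconstruction: collect positions of special and non-special
--     # passes, build the set of kept positions, and rebuild by sorted index.
--     special_idx = [i for i, p in enumerate(passes) if p in SPECIAL_PASSES]
--     nonspecial_idx = [i for i, p in enumerate(passes) if p not in SPECIAL_PASSES]
--     keep = set(special_idx)
--     for rank, i in enumerate(nonspecial_idx):
--         if low <= rank < high:
--             keep.add(i)
--     return [passes[i] for i in sorted(keep)]
-- ===== Notes on version B (the rewrite author's own statement) =====
-- stated objective: alternative
-- what changed: A's single interleaved loop with a running rank counter is replaced by an index-set reconstruction: enumerate once to split positions into special and non-special index lists, build a keep-set of positions (all specials plus non-specials whose rank satisfies low <= rank < high), and rebuild the output as [passes[i] for i in sorted(keep)].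
import Mathlib
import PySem

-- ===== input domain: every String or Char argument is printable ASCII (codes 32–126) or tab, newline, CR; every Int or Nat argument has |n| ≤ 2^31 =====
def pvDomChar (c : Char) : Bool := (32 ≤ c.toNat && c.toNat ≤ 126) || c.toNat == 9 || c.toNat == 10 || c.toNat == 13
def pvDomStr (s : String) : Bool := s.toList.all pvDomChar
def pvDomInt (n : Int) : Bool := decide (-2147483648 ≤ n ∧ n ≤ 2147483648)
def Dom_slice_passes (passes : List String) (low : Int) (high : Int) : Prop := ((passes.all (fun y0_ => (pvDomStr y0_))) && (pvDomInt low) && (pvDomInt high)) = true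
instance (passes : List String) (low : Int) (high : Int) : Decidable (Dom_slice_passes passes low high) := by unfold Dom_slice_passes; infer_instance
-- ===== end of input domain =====

-- B replaces A's single counting loop by an index-set reconstruction: collect the
-- positions of special and non-special passes, build the kept-position set, and
-- rebuild the output by sorted index (different decomposition, same cost).

-- ===== PORT A =====
def pvSPECIAL : List String := ["ReBindRefsPass", "InterDexPass"]

def slice_passes (passes : List String) (low : Int) (high : Int) : List String :=
  ((PySem.List.pyRange 0 (passes.length : Int) 1).foldl
    (fun (st : List String × Int) oldidx =>
      -- p = passes[oldidx]; oldidx ∈ range(0, len(passes)) is always in range, so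
      -- pyGetD with a dummy default is exact here
      let p := PySem.List.pyGetD passes oldidx ""
      if p ∈ pvSPECIAL then (st.1 ++ [p], st.2)
      else if low ≤ st.2 ∧ st.2 < high then (st.1 ++ [p], st.2 + 1)
      else (st.1, st.2 + 1)) ([], 0)).1

-- ===== PORT B =====
def slice_passes_alt (passes : List String) (low : Int) (high : Int) : List String :=
  let special_idx := (PySem.List.enumerate passes 0).filterMap
    (fun ip => if ip.2 ∈ pvSPECIAL then some ip.1 else none)
  let nonspecial_idx := (PySem.List.enumerate passes 0).filterMap
    (fun ip => if ip.2 ∈ pvSPECIAL then none else some ip.1)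
  let keep := (PySem.List.enumerate nonspecial_idx 0).foldl
    (fun (s : PySem.Set Int) ri =>
      if low ≤ ri.1 ∧ ri.1 < high then PySem.Set.add s ri.2 else s)
    (PySem.Set.ofList special_idx)
  -- passes[i]: every i ∈ keep is a valid index of passes, so pyGetD with a
  -- dummy default is exact here
  (PySem.List.sorted keep (fun x => x) false).map
    (fun i => PySem.List.pyGetD passes i "")

-- ===== PRECONDITION & SPEC =====
def Spec_slice_passes (passes : List String) (low : Int) (high : Int) (out : List String) : Prop := out = slice_passes_alt passes low high
instance (passes : List String) (low : Int) (high : Int) (out : List String) : Decidable (Spec_slice_passes passes low high out) := by unfold Spec_slice_passes; infer_instance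

-- ===== CLAIM (what is proved, stated in full; the proofs are below) =====
def Claim_equal_slice_passes : Prop := ∀ (passes : List String) (low : Int) (high : Int), Dom_slice_passes passes low high → Spec_slice_passes passes low high (slice_passes passes low high)

-- ===== LEMMAS AND PROOFS =====

-- Reference function: result of A's loop on `passes` with next non-special rank `c`.
def pvSpec (low high : Int) : List String → Int → List String
  | [], _ => []
  | p :: tl, c =>
    if p ∈ pvSPECIAL then p :: pvSpec low high tl c
    else if low ≤ c ∧ c < high then p :: pvSpec low high tl (c + 1)
    else pvSpec low high tl (c + 1)

-- positions of special passes, enumeration starting at i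
def pvSp : List String → Int → List Int
  | [], _ => []
  | p :: tl, i => if p ∈ pvSPECIAL then i :: pvSp tl (i + 1) else pvSp tl (i + 1)

-- positions of non-special passes, enumeration starting at i
def pvNs : List String → Int → List Int
  | [], _ => []
  | p :: tl, i => if p ∈ pvSPECIAL then pvNs tl (i + 1) else i :: pvNs tl (i + 1)

-- positions from `l` whose enumerate rank (starting at r) lies in [low, high)
def pvSel (low high : Int) : List Int → Int → List Int
  | [], _ => []
  | j :: tl, r => if low ≤ r ∧ r < high then j :: pvSel low high tl (r + 1)
                  else pvSel low high tl (r + 1)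

-- kept positions in ascending order (start index i, next non-special rank c)
def pvKeep (low high : Int) : List String → Int → Int → List Int
  | [], _, _ => []
  | p :: tl, i, c =>
    if p ∈ pvSPECIAL then i :: pvKeep low high tl (i + 1) c
    else if low ≤ c ∧ c < high then i :: pvKeep low high tl (i + 1) (c + 1)
    else pvKeep low high tl (i + 1) (c + 1)

theorem pvA_fold (low high : Int) (passes : List String) (acc : List String) (c : Int) :
    (passes.foldl
      (fun (st : List String × Int) p =>
        if p ∈ pvSPECIAL then (st.1 ++ [p], st.2)
        else if low ≤ st.2 ∧ st.2 < high then (st.1 ++ [p], st.2 + 1)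
        else (st.1, st.2 + 1)) (acc, c)).1 = acc ++ pvSpec low high passes c := by
  induction passes generalizing acc c with
  | nil => simp [pvSpec]
  | cons p tl ih =>
    by_cases hs : p ∈ pvSPECIAL
    · simp [pvSpec, hs, ih]
    · by_cases hr : low ≤ c ∧ c < high
      · simp [pvSpec, hs, hr, ih]
      · simp [pvSpec, hs, hr, ih]

theorem pvSp_eq (passes : List String) (i : Int) :
    (PySem.List.enumerate passes i).filterMap
      (fun ip => if ip.2 ∈ pvSPECIAL then some ip.1 else none) = pvSp passes i := by
  induction passes generalizing i with
  | nil => simp [PySem.List.enumerate_nil, pvSp]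
  | cons p tl ih =>
    by_cases hs : p ∈ pvSPECIAL <;>
      simp [PySem.List.enumerate_cons, pvSp, hs, ih]

theorem pvNs_eq (passes : List String) (i : Int) :
    (PySem.List.enumerate passes i).filterMap
      (fun ip => if ip.2 ∈ pvSPECIAL then none else some ip.1) = pvNs passes i := by
  induction passes generalizing i with
  | nil => simp [PySem.List.enumerate_nil, pvNs]
  | cons p tl ih =>
    by_cases hs : p ∈ pvSPECIAL <;>
      simp [PySem.List.enumerate_cons, pvNs, hs, ih]

theorem pvSp_ge (passes : List String) (i : Int) : ∀ j ∈ pvSp passes i, i ≤ j := by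
  induction passes generalizing i with
  | nil => simp [pvSp]
  | cons p tl ih =>
    intro j hj
    by_cases hs : p ∈ pvSPECIAL <;> simp [pvSp, hs] at hj
    · rcases hj with rfl | hj
      · exact le_refl j
      · exact le_trans (by omega) (ih (i + 1) j hj)
    · exact le_trans (by omega) (ih (i + 1) j hj)

theorem pvNs_ge (passes : List String) (i : Int) : ∀ j ∈ pvNs passes i, i ≤ j := by
  induction passes generalizing i with
  | nil => simp [pvNs]
  | cons p tl ih =>
    intro j hj
    by_cases hs : p ∈ pvSPECIAL <;> simp [pvNs, hs] at hj
    · exact le_trans (by omega) (ih (i + 1) j hj)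
    · rcases hj with rfl | hj
      · exact le_refl j
      · exact le_trans (by omega) (ih (i + 1) j hj)

theorem pvSp_pairwise (passes : List String) (i : Int) :
    (pvSp passes i).Pairwise (· < ·) := by
  induction passes generalizing i with
  | nil => simp [pvSp]
  | cons p tl ih =>
    by_cases hs : p ∈ pvSPECIAL <;> simp [pvSp, hs]
    · exact ⟨fun j hj => lt_of_lt_of_le (by omega) (pvSp_ge tl (i + 1) j hj), ih (i + 1)⟩
    · exact ih (i + 1)

theorem pvNs_pairwise (passes : List String) (i : Int) :
    (pvNs passes i).Pairwise (· < ·) := by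
  induction passes generalizing i with
  | nil => simp [pvNs]
  | cons p tl ih =>
    by_cases hs : p ∈ pvSPECIAL <;> simp [pvNs, hs]
    · exact ih (i + 1)
    · exact ⟨fun j hj => lt_of_lt_of_le (by omega) (pvNs_ge tl (i + 1) j hj), ih (i + 1)⟩

theorem pvDisjoint (passes : List String) (i : Int) :
    ∀ j ∈ pvNs passes i, j ∉ pvSp passes i := by
  induction passes generalizing i with
  | nil => simp [pvNs]
  | cons p tl ih =>
    intro j hj
    by_cases hs : p ∈ pvSPECIAL <;> simp [pvNs, pvSp, hs] at hj ⊢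
    · refine ⟨?_, ih (i + 1) j hj⟩
      have := pvNs_ge tl (i + 1) j hj; omega
    · rcases hj with rfl | hj
      · intro hmem; have := pvSp_ge tl (j + 1) j hmem; omega
      · exact ih (i + 1) j hj

-- B's fold over enumerate(l) appends exactly the rank-selected elements of l
theorem pvB_fold (low high : Int) (l : List Int) (r : Int) (s : PySem.Set Int)
    (hnin : ∀ j ∈ l, j ∉ s) (hnd : l.Nodup) :
    (PySem.List.enumerate l r).foldl
      (fun (s : PySem.Set Int) ri =>
        if low ≤ ri.1 ∧ ri.1 < high then PySem.Set.add s ri.2 else s) s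
      = s ++ pvSel low high l r := by
  induction l generalizing r s with
  | nil => simp [PySem.List.enumerate_nil, pvSel]
  | cons j tl ih =>
    rcases List.nodup_cons.mp hnd with ⟨hjntl, hndtl⟩
    by_cases hr : low ≤ r ∧ r < high
    · rw [PySem.List.enumerate_cons]
      simp only [List.foldl_cons, if_pos hr]
      rw [PySem.Set.add_of_not_mem (hnin j List.mem_cons_self)]
      rw [ih (r + 1) (s ++ [j])
        (fun j' hj' => by
          simp only [List.mem_append, List.mem_singleton]
          rintro (h | rfl)
          · exact hnin j' (List.mem_cons_of_mem _ hj') h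
          · exact hjntl hj') hndtl]
      simp [pvSel, hr]
    · rw [PySem.List.enumerate_cons]
      simp only [List.foldl_cons, if_neg hr]
      rw [ih (r + 1) s (fun j' hj' => hnin j' (List.mem_cons_of_mem _ hj')) hndtl]
      simp [pvSel, hr]

-- the kept positions are a permutation of specials ++ selected non-specials
theorem pvKeep_perm (low high : Int) (passes : List String) (i c : Int) :
    (pvKeep low high passes i c).Perm
      (pvSp passes i ++ pvSel low high (pvNs passes i) c) := by
  induction passes generalizing i c with
  | nil => simp [pvKeep, pvSp, pvNs, pvSel]
  | cons p tl ih =>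
    by_cases hs : p ∈ pvSPECIAL
    · simp only [pvKeep, pvSp, pvNs, if_pos hs, List.cons_append]
      exact (ih (i + 1) c).cons i
    · by_cases hr : low ≤ c ∧ c < high
      · simp only [pvKeep, pvSp, pvNs, pvSel, if_neg hs, if_pos hr]
        exact ((ih (i + 1) (c + 1)).cons i).trans List.perm_middle.symm
      · simp only [pvKeep, pvSp, pvNs, pvSel, if_neg hs, if_neg hr]
        exact ih (i + 1) (c + 1)

theorem pvKeep_ge (low high : Int) (passes : List String) (i c : Int) :
    ∀ j ∈ pvKeep low high passes i c, i ≤ j := by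
  induction passes generalizing i c with
  | nil => simp [pvKeep]
  | cons p tl ih =>
    intro j hj
    by_cases hs : p ∈ pvSPECIAL
    · simp [pvKeep, hs] at hj
      rcases hj with rfl | hj
      · exact le_refl j
      · exact le_trans (by omega) (ih (i + 1) c j hj)
    · by_cases hr : low ≤ c ∧ c < high <;> simp [pvKeep, hs, hr] at hj
      · rcases hj with rfl | hj
        · exact le_refl j
        · exact le_trans (by omega) (ih (i + 1) (c + 1) j hj)
      · exact le_trans (by omega) (ih (i + 1) (c + 1) j hj)

theorem pvKeep_pairwise (low high : Int) (passes : List String) (i c : Int) :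
    (pvKeep low high passes i c).Pairwise (· < ·) := by
  induction passes generalizing i c with
  | nil => simp [pvKeep]
  | cons p tl ih =>
    by_cases hs : p ∈ pvSPECIAL
    · simp only [pvKeep, if_pos hs]
      exact List.pairwise_cons.mpr
        ⟨fun j hj => lt_of_lt_of_le (by omega) (pvKeep_ge low high tl (i + 1) c j hj),
         ih (i + 1) c⟩
    · by_cases hr : low ≤ c ∧ c < high
      · simp only [pvKeep, if_neg hs, if_pos hr]
        exact List.pairwise_cons.mpr
          ⟨fun j hj => lt_of_lt_of_le (by omega) (pvKeep_ge low high tl (i + 1) (c + 1) j hj),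
           ih (i + 1) (c + 1)⟩
      · simp only [pvKeep, if_neg hs, if_neg hr]
        exact ih (i + 1) (c + 1)

-- reading the passes back at the kept positions gives A's reference result
theorem pvKeep_map (low high : Int) (tl pre : List String) (c : Int) :
    (pvKeep low high tl (pre.length : Int) c).map
      (fun j => PySem.List.pyGetD (pre ++ tl) j "") = pvSpec low high tl c := by
  induction tl generalizing pre c with
  | nil => simp [pvKeep, pvSpec]
  | cons p tl ih =>
    have hget : PySem.List.pyGetD (pre ++ p :: tl) (pre.length : Int) "" = p := by
      rw [PySem.List.pyGetD_natCast]
      simp [List.getD]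
    have hstep : ((pre ++ [p]).length : Int) = (pre.length : Int) + 1 := by
      simp
    have hcat : pre ++ p :: tl = (pre ++ [p]) ++ tl := by simp
    by_cases hs : p ∈ pvSPECIAL
    · simp only [pvKeep, pvSpec, if_pos hs, List.map_cons, hget]
      rw [hcat, ← hstep, ih (pre ++ [p]) c]
    · by_cases hr : low ≤ c ∧ c < high
      · simp only [pvKeep, pvSpec, if_neg hs, if_pos hr, List.map_cons, hget]
        rw [hcat, ← hstep, ih (pre ++ [p]) (c + 1)]
      · simp only [pvKeep, pvSpec, if_neg hs, if_neg hr]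
        rw [hcat, ← hstep, ih (pre ++ [p]) (c + 1)]

-- ===== VERDICT (by name: the statement is the Claim_ definition above) =====
theorem slice_passes_spec : Claim_equal_slice_passes := by
  intro passes low high _
  unfold Spec_slice_passes slice_passes slice_passes_alt
  -- A side
  rw [PySem.List.foldl_pyRange_zero_pyGetD' passes ""
    (fun (st : List String × Int) p =>
      if p ∈ pvSPECIAL then (st.1 ++ [p], st.2)
      else if low ≤ st.2 ∧ st.2 < high then (st.1 ++ [p], st.2 + 1)
      else (st.1, st.2 + 1)) ([], 0)]
  rw [pvA_fold]
  -- B side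
  simp only [pvSp_eq, pvNs_eq]
  have hof : PySem.Set.ofList (pvSp passes 0) = pvSp passes 0 :=
    PySem.Set.ofList_eq_self_of_nodup _ (pvSp_pairwise passes 0).nodup
  rw [hof]
  rw [pvB_fold low high (pvNs passes 0) 0 (pvSp passes 0)
    (pvDisjoint passes 0) (pvNs_pairwise passes 0).nodup]
  have hsort : PySem.List.sorted (pvSp passes 0 ++ pvSel low high (pvNs passes 0) 0)
      (fun x => x) false = pvKeep low high passes 0 0 :=
    PySem.List.sorted_eq_of_perm_of_pairwise_lt _ _ (fun x => x)
      (pvKeep_perm low high passes 0 0) (pvKeep_pairwise low high passes 0 0)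
  rw [hsort]
  have := pvKeep_map low high passes [] 0
  simpa using this.symm
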